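-- pv_equiv track=rewrite | github.com/LouChao98/nner_as_parsing | src/data/datamodule_more/brat.py | gen_span_list
-- ===== SOURCE A (Python) =====
-- from collections import defaultdict
--
-- def gen_span_list(inst):
--     raw_spans: Dict[str, Tuple[str, int, int]] = inst['raw_span']
--     span_dict = defaultdict(list)
--     for label, left, right in raw_spans.values():
--         span_dict[(left, right)].append(label)
--     return {
--         'span_list': [[left, right] for left, right in span_dict.keys()],
--     }
-- ===== SOURCE B (Python) =====
-- def gen_span_list(inst):
--     # Selection-style dedup: no dict, no set, no membership structure.
--     # Take the first remaining key, emit it, and FILTER all its later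
--     # occurrences out of the remaining work list; repeat until empty.
--     keys = [(left, right) for _, left, right in inst['raw_span'].values()]
--     span_list = []
--     while keys:
--         k = keys[0]
--         span_list.append([k[0], k[1]])
--         keys = [x for x in keys[1:] if x != k]
--     return {'span_list': span_list}
-- ===== Notes on version B (the rewrite author's own statement) =====
-- stated objective: alternative
-- what changed: Replaces A's defaultdict grouping (build a (left,right)->labels table, then list its keys) with selection-style deduplication: repeatedly emit the first remaining key and filter all its duplicates out of the work list, keeping no dict, set or membership structure at all.
import Mathlib
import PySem

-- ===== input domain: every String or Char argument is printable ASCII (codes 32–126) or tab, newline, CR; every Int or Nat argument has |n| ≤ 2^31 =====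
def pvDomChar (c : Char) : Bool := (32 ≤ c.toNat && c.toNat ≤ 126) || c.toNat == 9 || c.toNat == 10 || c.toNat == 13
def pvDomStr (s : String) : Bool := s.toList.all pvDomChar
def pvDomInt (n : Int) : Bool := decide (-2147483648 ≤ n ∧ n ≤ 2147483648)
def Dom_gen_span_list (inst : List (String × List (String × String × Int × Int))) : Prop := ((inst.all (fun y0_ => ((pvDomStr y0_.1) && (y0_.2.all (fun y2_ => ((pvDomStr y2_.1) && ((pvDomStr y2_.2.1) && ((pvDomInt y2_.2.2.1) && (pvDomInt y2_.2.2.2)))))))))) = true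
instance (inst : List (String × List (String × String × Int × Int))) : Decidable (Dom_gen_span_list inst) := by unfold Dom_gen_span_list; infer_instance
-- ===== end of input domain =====

-- B replaces A's defaultdict grouping with selection-style deduplication (emit the first
-- remaining key, filter its duplicates out of the work list); objective: alternative.


-- ===== PORT A =====
def gen_span_list (inst : List (String × List (String × String × Int × Int))) : List (String × List (List Int)) :=
  match (PySem.Dict.mk inst).get? "raw_span" with
  | none => []          -- KeyError: excluded by Pre_
  | some raw_spans =>
    let vals : List (String × Int × Int) := (PySem.Dict.mk raw_spans).values
    let span_dict : PySem.Dict (Int × Int) (List String) :=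
      vals.foldl (fun d v => d.modify (v.2.1, v.2.2) [] (fun ls => ls ++ [v.1])) PySem.Dict.empty
    [("span_list", span_dict.keys.map (fun k => [k.1, k.2]))]

-- ===== PORT B =====
-- Source B's while-loop (fuel = initial list length, a totality device only: each
-- iteration strictly shrinks the work list, so fuel is never exhausted):
-- emit the head key, filter its duplicates out of the rest, repeat.
def bLoop : Nat → List (Int × Int) → List (List Int) → List (List Int)
  | _, [], out => out
  | 0, _ :: _, out => out   -- unreachable with fuel = length
  | n + 1, k :: rest, out => bLoop n (rest.filter (fun x => x ≠ k)) (out ++ [[k.1, k.2]])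

def gen_span_list_alt (inst : List (String × List (String × String × Int × Int))) : List (String × List (List Int)) :=
  match (PySem.Dict.mk inst).get? "raw_span" with
  | none => []          -- KeyError: excluded by Pre_
  | some raw_spans =>
    let keys : List (Int × Int) := (PySem.Dict.mk raw_spans).values.map (fun v => (v.2.1, v.2.2))
    [("span_list", bLoop keys.length keys [])]

-- ===== PRECONDITION & SPEC =====
-- Pre_: the key 'raw_span' must be present; A raises KeyError otherwise (and so does B).
def Pre_gen_span_list (inst : List (String × List (String × String × Int × Int))) : Prop :=
  (PySem.Dict.mk inst).contains "raw_span" = true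
instance (inst : List (String × List (String × String × Int × Int))) : Decidable (Pre_gen_span_list inst) := by unfold Pre_gen_span_list; infer_instance
def pvWitness_gen_span_list : (List (String × List (String × String × Int × Int))) :=
  [("raw_span", [("T1", "PER", 1, 3), ("T2", "ORG", 1, 3), ("T3", "LOC", 0, 2)])]
def Spec_gen_span_list (inst : List (String × List (String × String × Int × Int))) (out : List (String × List (List Int))) : Prop := out = gen_span_list_alt inst
instance (inst : List (String × List (String × String × Int × Int))) (out : List (String × List (List Int))) : Decidable (Spec_gen_span_list inst out) := by unfold Spec_gen_span_list; infer_instance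

-- ===== CLAIM (what is proved, stated in full; the proofs are below) =====
def Claim_equal_gen_span_list : Prop := ∀ (inst : List (String × List (String × String × Int × Int))), Dom_gen_span_list inst → Pre_gen_span_list inst → Spec_gen_span_list inst (gen_span_list inst)

-- ===== LEMMAS AND PROOFS =====

-- Selection-dedup as a pure function (same fuelled recursion, without the accumulator).
def uK : Nat → List (Int × Int) → List (Int × Int)
  | _, [] => []
  | 0, _ :: _ => []
  | n + 1, k :: rest => k :: uK n (rest.filter (fun x => x ≠ k))

-- Source B's loop accumulates exactly the selection-dedup, rendered as [left, right] lists.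
theorem bLoop_eq (n : Nat) (l : List (Int × Int)) (out : List (List Int)) :
    bLoop n l out = out ++ (uK n l).map (fun k => [k.1, k.2]) := by
  induction n generalizing l out with
  | zero => cases l <;> simp [bLoop, uK]
  | succ n ih =>
    cases l with
    | nil => simp [bLoop, uK]
    | cons k rest => rw [bLoop, uK, ih]; simp

-- uK ignores extra fuel: any fuel ≥ the list length gives the same result.
theorem uK_fuel (n m : Nat) (l : List (Int × Int)) (hn : l.length ≤ n) (hm : l.length ≤ m) :
    uK n l = uK m l := by
  induction n generalizing l m with
  | zero =>
    have : l = [] := List.eq_nil_of_length_eq_zero (Nat.le_zero.mp hn)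
    subst this; cases m <;> simp [uK]
  | succ n ih =>
    cases l with
    | nil => cases m <;> simp [uK]
    | cons k rest =>
      cases m with
      | zero => simp at hm
      | succ m =>
        rw [uK, uK]
        have hfl : (rest.filter (fun x => x ≠ k)).length ≤ rest.length := List.length_filter_le _ _
        rw [ih m _ (le_trans hfl (Nat.le_of_succ_le_succ hn)) (le_trans hfl (Nat.le_of_succ_le_succ hm))]

-- A's insertion-order key set equals selection-dedup of the keys not already present.
theorem update_eq_uK (n : Nat) (l : List (Int × Int)) (hn : l.length ≤ n) (s : PySem.Set (Int × Int)) :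
    PySem.Set.update s l = s ++ uK n (l.filter (fun x => ¬ x ∈ s)) := by
  induction n generalizing l s with
  | zero =>
    have : l = [] := List.eq_nil_of_length_eq_zero (Nat.le_zero.mp hn)
    subst this; simp [PySem.Set.update, uK]
  | succ n ih =>
    cases l with
    | nil => simp [PySem.Set.update, uK]
    | cons k rest =>
      rw [PySem.Set.update_cons]
      by_cases h : k ∈ s
      · have hadd : PySem.Set.add s k = s := by simp [PySem.Set.add, PySem.Set.contains, h]
        rw [hadd, ih rest (Nat.le_of_succ_le_succ hn) s]
        have hfl : (rest.filter (fun x => ¬ x ∈ s)).length ≤ n :=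
          le_trans (List.length_filter_le _ _) (Nat.le_of_succ_le_succ hn)
        have hc : List.filter (fun x => decide ¬ x ∈ s) (k :: rest)
            = List.filter (fun x => decide ¬ x ∈ s) rest := by simp [h]
        rw [hc]
        congr 1
        exact uK_fuel n (n + 1) _ hfl (le_trans hfl (Nat.le_succ n))
      · have hadd : PySem.Set.add s k = s ++ [k] := by simp [PySem.Set.add, PySem.Set.contains, h]
        rw [hadd, ih rest (Nat.le_of_succ_le_succ hn) (s ++ [k])]
        have hf : List.filter (fun x => decide ¬ x ∈ s ++ [k]) rest
            = List.filter (fun x => decide (x ≠ k)) (List.filter (fun x => decide ¬ x ∈ s) rest) := by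
          rw [List.filter_filter]
          apply List.filter_congr
          intro x hx
          simp [List.mem_append, and_comm]
        rw [hf]
        have hc : List.filter (fun x => decide ¬ x ∈ s) (k :: rest)
            = k :: List.filter (fun x => decide ¬ x ∈ s) rest := by simp [h]
        rw [hc, uK]
        simp

-- ===== VERDICT (by name: the statement is the Claim_ definition above) =====
theorem gen_span_list_spec : Claim_equal_gen_span_list := by
  intro inst _ _
  unfold Spec_gen_span_list gen_span_list gen_span_list_alt
  cases h : (PySem.Dict.mk inst).get? "raw_span" with
  | none => rfl
  | some raw_spans =>
    simp only
    rw [PySem.Dict.keys_foldl_modify_key ((PySem.Dict.mk raw_spans).values)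
         (fun v => (v.2.1, v.2.2)) ([] : List String)
         (fun (_ : PySem.Dict (Int × Int) (List String)) (v : String × Int × Int) (ls : List String) => ls ++ [v.1])
         PySem.Dict.empty,
       bLoop_eq]
    rw [PySem.Dict.keys_empty,
        update_eq_uK (((PySem.Dict.mk raw_spans).values.map (fun v => (v.2.1, v.2.2))).length) _ (by simp) []]
    simp
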